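-- pv_equiv track=rewrite | github.com/cinderlee/advent-of-code | 2020/day17.py | simulate_cycles_3D
-- ===== SOURCE A (Python) =====
-- def get_neighbors_3D(i, j, k):
--     '''
--     Returns a list of neighbor coordinates given a
--     current location (i, j, k).
--     '''
--     neighbor_lst = []
--     for x in range(i - 1, i + 2):
--         for y in range(j - 1, j + 2):
--             for z in range(k - 1, k + 2):
--                 if x == i and j == y and k == z:
--                     continue
--                 neighbor_lst.append((x, y, z))
--     return neighbor_lst
--
-- def get_updated_active_set(neighbor_counts, curr_active_set):
--     '''
--     Returns a new set of active cubes. The current active set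
--     and dictionary where the location key is mapped to number of
--     active neighbors are given.
--     '''
--     new_active_set = set()
--     for elem in neighbor_counts:
--         if elem in curr_active_set and (neighbor_counts[elem] == 2 or neighbor_counts[elem] == 3):
--             new_active_set.add(elem)
--         elif elem not in curr_active_set and neighbor_counts[elem] == 3:
--             new_active_set.add(elem)
--     return new_active_set
--
-- def simulate_cycles_3D(active_set, num_cycles):
--     '''
--     Returns the set of active cubes after performing simulating
--     energy boot process.
--     '''
--     cycle_count = 0
--     while cycle_count < num_cycles:
--         neighbor_counts = {}
--         for x, y, z in active_set:
--             neighbor_lst = get_neighbors_3D(x, y, z)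
--             for neighbor in neighbor_lst:
--                 if neighbor in neighbor_counts:
--                     neighbor_counts[neighbor] += 1
--                 else:
--                     neighbor_counts[neighbor] = 1
--
--         active_set = get_updated_active_set(neighbor_counts, active_set)
--         cycle_count += 1
--     return active_set
-- ===== SOURCE B (Python) =====
-- # Gather-style reimplementation: per cycle, build the candidate cells (all neighbors
-- # of active cells) and decide each candidate by counting its own active neighbors
-- # via membership tests, instead of scattering +1 counts into a dict.
-- def simulate_cycles_3D(active_set, num_cycles):
--     def neighbors(c):
--         x, y, z = c
--         return [(x + dx, y + dy, z + dz)
--                 for dx in (-1, 0, 1) for dy in (-1, 0, 1) for dz in (-1, 0, 1)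
--                 if (dx, dy, dz) != (0, 0, 0)]
--
--     cycle = 0
--     while cycle < num_cycles:
--         candidates = []
--         seen = set()
--         for cell in active_set:
--             for n in neighbors(cell):
--                 if n not in seen:
--                     seen.add(n)
--                     candidates.append(n)
--         new_active = set()
--         for c in candidates:
--             cnt = sum(1 for n in neighbors(c) if n in active_set)
--             if cnt == 3 or (cnt == 2 and c in active_set):
--                 new_active.add(c)
--         active_set = new_active
--         cycle += 1
--     return active_set
-- ===== Notes on version B (the rewrite author's own statement) =====
-- stated objective: alternative
-- what changed: Replaced the scatter step (a dict of +1 neighbor counts built from each active cell, then filtered) by a gather step: build the deduplicated candidate list of all neighbors of active cells, then count each candidate's active neighbors by membership tests in the current active set.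
import Mathlib
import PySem

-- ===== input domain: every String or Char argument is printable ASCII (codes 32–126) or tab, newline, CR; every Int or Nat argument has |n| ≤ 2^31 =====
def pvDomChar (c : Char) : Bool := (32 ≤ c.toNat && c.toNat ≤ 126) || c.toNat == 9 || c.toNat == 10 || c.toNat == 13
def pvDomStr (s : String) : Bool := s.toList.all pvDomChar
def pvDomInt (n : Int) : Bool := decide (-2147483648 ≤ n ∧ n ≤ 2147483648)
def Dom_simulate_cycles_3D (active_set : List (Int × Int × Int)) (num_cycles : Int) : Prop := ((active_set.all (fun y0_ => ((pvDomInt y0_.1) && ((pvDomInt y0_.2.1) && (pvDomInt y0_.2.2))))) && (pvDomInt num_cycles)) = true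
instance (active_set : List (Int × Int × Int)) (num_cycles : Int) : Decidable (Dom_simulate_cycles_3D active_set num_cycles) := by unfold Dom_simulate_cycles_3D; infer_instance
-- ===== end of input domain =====

-- B replaces A's scatter step (dict of +1 neighbor counts, then filtered) by a gather step
-- (deduplicated candidate list, each candidate decided by counting its own active neighbors
-- via membership tests); same result, similar cost (objective: alternative). A's Python
-- iterates a hash set only where the resulting set does not depend on that order.

-- ===== PORT A =====
def get_neighbors_3D (i j k : Int) : List (Int × Int × Int) :=
  (PySem.List.pyRange (i - 1) (i + 2) 1).foldl (fun acc x =>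
    (PySem.List.pyRange (j - 1) (j + 2) 1).foldl (fun acc y =>
      (PySem.List.pyRange (k - 1) (k + 2) 1).foldl (fun acc z =>
        if x = i ∧ j = y ∧ k = z then acc else acc ++ [(x, y, z)]) acc) acc) []

-- 'neighbor_counts[elem]' on a present key is ported as 'getD elem 0'
def get_updated_active_set (neighbor_counts : PySem.Dict (Int × Int × Int) Int)
    (curr_active_set : List (Int × Int × Int)) : List (Int × Int × Int) :=
  neighbor_counts.keys.foldl (fun new_active_set elem =>
    if elem ∈ curr_active_set ∧ (neighbor_counts.getD elem 0 = 2 ∨ neighbor_counts.getD elem 0 = 3) then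
      PySem.Set.add new_active_set elem
    else if elem ∉ curr_active_set ∧ neighbor_counts.getD elem 0 = 3 then
      PySem.Set.add new_active_set elem
    else new_active_set) PySem.Set.empty

def simulate_loop (active_set : List (Int × Int × Int)) (cycle_count num_cycles : Int) :
    List (Int × Int × Int) :=
  if cycle_count < num_cycles then
    let neighbor_counts := active_set.foldl (fun d cell =>
      (get_neighbors_3D cell.1 cell.2.1 cell.2.2).foldl (fun d neighbor =>
        if d.contains neighbor then d.insert neighbor (d.getD neighbor 0 + 1)
        else d.insert neighbor 1) d) PySem.Dict.empty
    simulate_loop (get_updated_active_set neighbor_counts active_set) (cycle_count + 1) num_cycles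
  else active_set
termination_by (num_cycles - cycle_count).toNat
decreasing_by omega

def simulate_cycles_3D (active_set : List (Int × Int × Int)) (num_cycles : Int) :
    List (Int × Int × Int) :=
  simulate_loop active_set 0 num_cycles

-- ===== PORT B =====
def neighbors_alt (c : Int × Int × Int) : List (Int × Int × Int) :=
  ([-1, 0, 1] : List Int).flatMap (fun dx =>
    ([-1, 0, 1] : List Int).flatMap (fun dy =>
      ([-1, 0, 1] : List Int).filterMap (fun dz =>
        if (dx, dy, dz) = ((0 : Int), (0 : Int), (0 : Int)) then none
        else some (c.1 + dx, c.2.1 + dy, c.2.2 + dz))))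

def simulate_loop_alt (active_set : List (Int × Int × Int)) (cycle num_cycles : Int) :
    List (Int × Int × Int) :=
  if cycle < num_cycles then
    let st := active_set.foldl (fun (st : PySem.Set (Int × Int × Int) × List (Int × Int × Int)) cell =>
      (neighbors_alt cell).foldl (fun st n =>
        if PySem.Set.contains st.1 n then st else (PySem.Set.add st.1 n, st.2 ++ [n])) st)
      (PySem.Set.empty, [])
    let new_active := st.2.foldl (fun s c =>
      let cnt := ((neighbors_alt c).map (fun n => if n ∈ active_set then (1 : Int) else 0)).sum
      if cnt = 3 ∨ (cnt = 2 ∧ c ∈ active_set) then PySem.Set.add s c else s) PySem.Set.empty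
    simulate_loop_alt new_active (cycle + 1) num_cycles
  else active_set
termination_by (num_cycles - cycle).toNat
decreasing_by omega

def simulate_cycles_3D_alt (active_set : List (Int × Int × Int)) (num_cycles : Int) :
    List (Int × Int × Int) :=
  simulate_loop_alt active_set 0 num_cycles

-- ===== PRECONDITION & SPEC =====
-- active_set is a Python 'set', encoded as the list of its DISTINCT elements; Pre_ states
-- exactly that encoding invariant (a list with duplicates encodes no Python input).
def Pre_simulate_cycles_3D (active_set : List (Int × Int × Int)) (num_cycles : Int) : Prop :=
  active_set.Nodup
instance (active_set : List (Int × Int × Int)) (num_cycles : Int) : Decidable (Pre_simulate_cycles_3D active_set num_cycles) := by unfold Pre_simulate_cycles_3D; infer_instance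

def pvWitness_simulate_cycles_3D : (List (Int × Int × Int)) × Int := ([(0, 0, 0), (1, 0, 0), (2, 0, 0)], 2)

def Spec_simulate_cycles_3D (active_set : List (Int × Int × Int)) (num_cycles : Int) (out : List (Int × Int × Int)) : Prop := out = simulate_cycles_3D_alt active_set num_cycles
instance (active_set : List (Int × Int × Int)) (num_cycles : Int) (out : List (Int × Int × Int)) : Decidable (Spec_simulate_cycles_3D active_set num_cycles out) := by unfold Spec_simulate_cycles_3D; infer_instance

-- ===== CLAIM (what is proved, stated in full; the proofs are below) =====
def Claim_equal_simulate_cycles_3D : Prop := ∀ (active_set : List (Int × Int × Int)) (num_cycles : Int), Dom_simulate_cycles_3D active_set num_cycles → Pre_simulate_cycles_3D active_set num_cycles → Spec_simulate_cycles_3D active_set num_cycles (simulate_cycles_3D active_set num_cycles)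

-- ===== LEMMAS AND PROOFS =====

-- the 26 neighbor offsets, in both programs' traversal order, and the common normal form N
def offs : List (Int × Int × Int) :=
  [(-1, -1, -1), (-1, -1, 0), (-1, -1, 1), (-1, 0, -1), (-1, 0, 0), (-1, 0, 1), (-1, 1, -1),
   (-1, 1, 0), (-1, 1, 1), (0, -1, -1), (0, -1, 0), (0, -1, 1), (0, 0, -1), (0, 0, 1),
   (0, 1, -1), (0, 1, 0), (0, 1, 1), (1, -1, -1), (1, -1, 0), (1, -1, 1), (1, 0, -1),
   (1, 0, 0), (1, 0, 1), (1, 1, -1), (1, 1, 0), (1, 1, 1)]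

def N (c : Int × Int × Int) : List (Int × Int × Int) :=
  offs.map (fun d => (c.1 + d.1, c.2.1 + d.2.1, c.2.2 + d.2.2))

-- the neighbor stream one cycle of either program processes
def S (active : List (Int × Int × Int)) : List (Int × Int × Int) := active.flatMap N

lemma pyRange_three (i : Int) : PySem.List.pyRange (i - 1) (i + 2) 1 = [i - 1, i, i + 1] := by
  rw [PySem.List.pyRange_one_cons (by omega), PySem.List.pyRange_one_cons (by omega),
      PySem.List.pyRange_one_cons (by omega), PySem.List.pyRange_one_eq_nil (by omega)]
  norm_num

lemma zfold (i j k x y : Int) (acc : List (Int × Int × Int)) :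
    (PySem.List.pyRange (k - 1) (k + 2) 1).foldl
      (fun acc z => if x = i ∧ j = y ∧ k = z then acc else acc ++ [(x, y, z)]) acc
    = acc ++ (if x = i ∧ j = y then [(x, y, k - 1), (x, y, k + 1)]
              else [(x, y, k - 1), (x, y, k), (x, y, k + 1)]) := by
  rw [pyRange_three k, List.foldl_cons, List.foldl_cons, List.foldl_cons, List.foldl_nil]
  rw [if_neg (show ¬(x = i ∧ j = y ∧ k = k - 1) by omega),
      if_neg (show ¬(x = i ∧ j = y ∧ k = k + 1) by omega)]
  by_cases hxy : x = i ∧ j = y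
  · rw [if_pos (show x = i ∧ j = y ∧ k = k from ⟨hxy.1, hxy.2, rfl⟩), if_pos hxy]
    simp
  · rw [if_neg (show ¬(x = i ∧ j = y ∧ k = k) by tauto), if_neg hxy]
    simp

lemma yfold (i j k x : Int) (acc : List (Int × Int × Int)) :
    (PySem.List.pyRange (j - 1) (j + 2) 1).foldl (fun acc y =>
      (PySem.List.pyRange (k - 1) (k + 2) 1).foldl
        (fun acc z => if x = i ∧ j = y ∧ k = z then acc else acc ++ [(x, y, z)]) acc) acc
    = acc ++ (if x = i then
        [(x, j - 1, k - 1), (x, j - 1, k), (x, j - 1, k + 1),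
         (x, j, k - 1), (x, j, k + 1),
         (x, j + 1, k - 1), (x, j + 1, k), (x, j + 1, k + 1)]
      else
        [(x, j - 1, k - 1), (x, j - 1, k), (x, j - 1, k + 1),
         (x, j, k - 1), (x, j, k), (x, j, k + 1),
         (x, j + 1, k - 1), (x, j + 1, k), (x, j + 1, k + 1)]) := by
  rw [pyRange_three j, List.foldl_cons, List.foldl_cons, List.foldl_cons, List.foldl_nil]
  rw [zfold, zfold, zfold]
  rw [if_neg (show ¬(x = i ∧ j = j - 1) by omega), if_neg (show ¬(x = i ∧ j = j + 1) by omega)]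
  by_cases hx : x = i
  · rw [if_pos (show x = i ∧ j = j from ⟨hx, rfl⟩), if_pos hx]
    simp
  · rw [if_neg (show ¬(x = i ∧ j = j) by tauto), if_neg hx]
    simp

lemma nbA_eq (i j k : Int) : get_neighbors_3D i j k = N (i, j, k) := by
  unfold get_neighbors_3D
  rw [pyRange_three i, List.foldl_cons, List.foldl_cons, List.foldl_cons, List.foldl_nil]
  rw [yfold, yfold, yfold]
  rw [if_neg (show ¬(i - 1 = i) by omega), if_neg (show ¬(i + 1 = i) by omega),
      if_pos (show i = i from rfl)]
  simp only [N, offs, List.map_cons, List.map_nil, List.nil_append, List.cons_append]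
  simp only [List.cons.injEq, Prod.mk.injEq, true_and, and_true]
  all_goals omega

lemma nbB_eq (c : Int × Int × Int) : neighbors_alt c = N c := by
  simp only [neighbors_alt, N, offs, List.flatMap_cons, List.flatMap_nil, List.filterMap_cons,
    List.filterMap_nil, List.map]
  norm_num

lemma nodup_offs : offs.Nodup := by decide

lemma nodup_N (c : Int × Int × Int) : (N c).Nodup := by
  apply List.Nodup.map _ nodup_offs
  intro a b h
  simp only [Prod.ext_iff] at h ⊢
  omega

lemma neg_mem_offs : ∀ d ∈ offs, ((-d.1, -d.2.1, -d.2.2) : Int × Int × Int) ∈ offs := by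
  decide

lemma mem_N_symm (a c : Int × Int × Int) : a ∈ N c ↔ c ∈ N a := by
  have key : ∀ a c : Int × Int × Int, a ∈ N c → c ∈ N a := by
    intro a c ha
    obtain ⟨d, hd, rfl⟩ := List.mem_map.mp ha
    refine List.mem_map.mpr ⟨(-d.1, -d.2.1, -d.2.2), neg_mem_offs d hd, ?_⟩
    obtain ⟨c1, c2, c3⟩ := c
    obtain ⟨d1, d2, d3⟩ := d
    simp only [Prod.mk.injEq]
    omega
  exact ⟨key a c, key c a⟩

lemma count_S (active : List (Int × Int × Int)) (c : Int × Int × Int) :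
    (S active).count c = active.countP (fun a => decide (a ∈ N c)) := by
  induction active with
  | nil => simp [S]
  | cons a l ih =>
    simp only [S, List.flatMap_cons, List.count_append, List.countP_cons]
    rw [← S, ih]
    by_cases h : a ∈ N c
    · rw [← mem_N_symm] at h
      rw [List.count_eq_one_of_mem (nodup_N a) h]
      rw [mem_N_symm] at h
      simp [h]
      omega
    · rw [← mem_N_symm] at h
      rw [List.count_eq_zero.mpr h]
      rw [mem_N_symm] at h
      simp [h]

lemma countP_mem_comm {l t : List (Int × Int × Int)} (hl : l.Nodup) (ht : t.Nodup) :
    l.countP (fun x => decide (x ∈ t)) = t.countP (fun x => decide (x ∈ l)) := by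
  rw [List.countP_eq_length_filter, List.countP_eq_length_filter]
  rw [← List.toFinset_card_of_nodup (hl.filter _), ← List.toFinset_card_of_nodup (ht.filter _)]
  congr 1
  ext x
  simp only [List.mem_toFinset, List.mem_filter, decide_eq_true_eq]
  tauto

lemma cnt_eq (active : List (Int × Int × Int)) (c : Int × Int × Int) (h : active.Nodup) :
    (N c).countP (fun n => decide (n ∈ active)) = (S active).count c := by
  rw [count_S, countP_mem_comm h (nodup_N c)]

-- generic: a conditional Set.add loop over fresh distinct elements is a filter
lemma foldl_add_filter (p : Int × Int × Int → Bool) :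
    ∀ (l s0 : List (Int × Int × Int)), (∀ x ∈ l, x ∉ s0) → l.Nodup →
      l.foldl (fun s x => if p x then PySem.Set.add s x else s) s0 = s0 ++ l.filter p := by
  intro l
  induction l with
  | nil => simp
  | cons a l ih =>
    intro s0 hfresh hnd
    simp only [List.foldl_cons, List.filter_cons]
    by_cases hp : p a
    · rw [if_pos hp, if_pos hp, PySem.Set.add_of_not_mem (hfresh a (by simp))]
      rw [ih (s0 ++ [a]) ?_ hnd.of_cons]
      · simp
      · intro x hx
        simp only [List.mem_append, List.mem_singleton]
        rintro (h | rfl)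
        · exact hfresh x (by simp [hx]) h
        · exact (List.nodup_cons.mp hnd).1 hx
    · rw [if_neg hp, if_neg hp]
      exact ih s0 (fun x hx => hfresh x (by simp [hx])) hnd.of_cons

-- the dedup loop of B: seen and candidates stay equal and are Set.update of the stream
lemma foldl_seen (l : List (Int × Int × Int)) :
    ∀ s : List (Int × Int × Int),
      l.foldl (fun st n => if PySem.Set.contains st.1 n then st
        else (PySem.Set.add st.1 n, st.2 ++ [n])) (s, s) = (PySem.Set.update s l, PySem.Set.update s l) := by
  induction l with
  | nil => simp [PySem.Set.update_nil]
  | cons a l ih =>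
    intro s
    simp only [List.foldl_cons, PySem.Set.update_cons]
    by_cases h : a ∈ s
    · rw [if_pos (by simpa [PySem.Set.contains_iff] using h), PySem.Set.add_of_mem h]
      exact ih s
    · rw [if_neg (by simpa [PySem.Set.contains_iff] using h), PySem.Set.add_of_not_mem h]
      exact ih (s ++ [a])

-- A's per-cycle counter dict is Counter(S active)
lemma counts_eq (active : List (Int × Int × Int)) :
    active.foldl (fun d cell =>
      (get_neighbors_3D cell.1 cell.2.1 cell.2.2).foldl (fun d neighbor =>
        if d.contains neighbor then d.insert neighbor (d.getD neighbor 0 + 1)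
        else d.insert neighbor 1) d) PySem.Dict.empty = PySem.Dict.counter (S active) := by
  have hfun : (fun (d : PySem.Dict (Int × Int × Int) Int) neighbor =>
      if d.contains neighbor then d.insert neighbor (d.getD neighbor 0 + 1)
      else d.insert neighbor 1) = (fun d x => d.insert x (d.getD x 0 + 1)) := by
    funext d n
    by_cases hc : d.contains n = true
    · rw [if_pos hc]
    · rw [if_neg (by simp [hc]), PySem.Dict.getD_of_not_contains d 0 (by simpa using hc)]
      norm_num
  simp only [hfun, nbA_eq]
  rw [← PySem.Dict.foldl_insert_getD_add_one_eq_counter, ← List.foldl_flatMap]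
  rfl

-- the shared per-cycle survival condition, phrased on the stream counts
def condA (active : List (Int × Int × Int)) (k : Int × Int × Int) : Bool :=
  decide ((k ∈ active ∧ (((S active).count k : Int) = 2 ∨ ((S active).count k : Int) = 3)) ∨
          (k ∉ active ∧ ((S active).count k : Int) = 3))

lemma stepA_eq (active : List (Int × Int × Int)) :
    get_updated_active_set (active.foldl (fun d cell =>
      (get_neighbors_3D cell.1 cell.2.1 cell.2.2).foldl (fun d neighbor =>
        if d.contains neighbor then d.insert neighbor (d.getD neighbor 0 + 1)
        else d.insert neighbor 1) d) PySem.Dict.empty) active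
    = (PySem.Set.ofList (S active)).filter (condA active) := by
  rw [counts_eq]
  unfold get_updated_active_set
  rw [PySem.Dict.keys_counter]
  have hfun : (fun new_active_set elem =>
      if elem ∈ active ∧ ((PySem.Dict.counter (S active)).getD elem 0 = 2 ∨
            (PySem.Dict.counter (S active)).getD elem 0 = 3) then
        PySem.Set.add new_active_set elem
      else if elem ∉ active ∧ (PySem.Dict.counter (S active)).getD elem 0 = 3 then
        PySem.Set.add new_active_set elem
      else new_active_set)
      = (fun (s : List (Int × Int × Int)) x => if condA active x then PySem.Set.add s x else s) := by
    funext s elem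
    simp only [condA, PySem.Dict.getD_counter, decide_eq_true_eq]
    by_cases h1 : elem ∈ active ∧ (((S active).count elem : Int) = 2 ∨ ((S active).count elem : Int) = 3)
    · rw [if_pos h1, if_pos (Or.inl h1)]
    · rw [if_neg h1]
      by_cases h2 : elem ∉ active ∧ ((S active).count elem : Int) = 3
      · rw [if_pos h2, if_pos (Or.inr h2)]
      · rw [if_neg h2, if_neg (by tauto)]
  rw [hfun]
  rw [foldl_add_filter _ _ _ (by simp [PySem.Set.empty]) (PySem.Set.nodup_ofList _)]
  simp [PySem.Set.empty]

lemma stepB_eq (active : List (Int × Int × Int)) (h : active.Nodup) :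
    (active.foldl (fun (st : PySem.Set (Int × Int × Int) × List (Int × Int × Int)) cell =>
      (neighbors_alt cell).foldl (fun st n =>
        if PySem.Set.contains st.1 n then st else (PySem.Set.add st.1 n, st.2 ++ [n])) st)
      (PySem.Set.empty, [])).2.foldl (fun s c =>
        if ((neighbors_alt c).map (fun n => if n ∈ active then (1 : Int) else 0)).sum = 3 ∨
            (((neighbors_alt c).map (fun n => if n ∈ active then (1 : Int) else 0)).sum = 2 ∧
              c ∈ active) then PySem.Set.add s c else s) PySem.Set.empty
    = (PySem.Set.ofList (S active)).filter (condA active) := by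
  have hst : (active.foldl (fun (st : PySem.Set (Int × Int × Int) × List (Int × Int × Int)) cell =>
      (neighbors_alt cell).foldl (fun st n =>
        if PySem.Set.contains st.1 n then st else (PySem.Set.add st.1 n, st.2 ++ [n])) st)
      (PySem.Set.empty, [])) = (PySem.Set.ofList (S active), PySem.Set.ofList (S active)) := by
    simp only [nbB_eq]
    rw [← List.foldl_flatMap]
    show (S active).foldl _ (([] : List (Int × Int × Int)), ([] : List (Int × Int × Int))) = _
    rw [foldl_seen (S active) []]
    rw [PySem.Set.update_nil_left]
  rw [hst]
  have hcnt : ∀ c : Int × Int × Int,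
      ((neighbors_alt c).map (fun n => if n ∈ active then (1 : Int) else 0)).sum
        = ((S active).count c : Int) := by
    intro c
    rw [nbB_eq, PySem.List.sum_map_ite_one_zero' (fun n => n ∈ active), cnt_eq active c h]
  have hfun : (fun (s : List (Int × Int × Int)) c =>
      if ((neighbors_alt c).map (fun n => if n ∈ active then (1 : Int) else 0)).sum = 3 ∨
          (((neighbors_alt c).map (fun n => if n ∈ active then (1 : Int) else 0)).sum = 2 ∧
            c ∈ active) then PySem.Set.add s c else s)
      = (fun (s : List (Int × Int × Int)) x => if condA active x then PySem.Set.add s x else s) := by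
    funext s c
    rw [hcnt c]
    simp only [condA, decide_eq_true_eq]
    by_cases hm : c ∈ active <;>
      by_cases h2 : ((S active).count c : Int) = 2 <;>
      by_cases h3 : ((S active).count c : Int) = 3 <;>
      simp only [hm, h2, h3, not_true, not_false_iff, true_and, false_and, and_true, and_false,
        or_false, false_or, true_or, or_true, if_pos, if_neg]
  rw [hfun]
  rw [foldl_add_filter _ _ _ (by simp [PySem.Set.empty]) (PySem.Set.nodup_ofList _)]
  simp [PySem.Set.empty]

lemma loop_eq : ∀ (fuel : Nat) (active : List (Int × Int × Int)) (cyc n : Int),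
    (n - cyc).toNat = fuel → active.Nodup →
    simulate_loop active cyc n = simulate_loop_alt active cyc n := by
  intro fuel
  induction fuel with
  | zero =>
    intro active cyc n hf _
    rw [simulate_loop, simulate_loop_alt, if_neg (by omega), if_neg (by omega)]
  | succ m ih =>
    intro active cyc n hf hnd
    rw [simulate_loop, simulate_loop_alt]
    by_cases hlt : cyc < n
    · rw [if_pos hlt, if_pos hlt]
      simp only []
      rw [stepA_eq active, stepB_eq active hnd]
      exact ih _ (cyc + 1) n (by omega) ((PySem.Set.nodup_ofList _).filter _)
    · rw [if_neg hlt, if_neg hlt]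

-- ===== VERDICT (by name: the statement is the Claim_ definition above) =====
theorem simulate_cycles_3D_spec : Claim_equal_simulate_cycles_3D := by
  intro active_set num_cycles _ hpre
  unfold Spec_simulate_cycles_3D simulate_cycles_3D simulate_cycles_3D_alt
  exact loop_eq (num_cycles - 0).toNat active_set 0 num_cycles rfl hpre
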